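-- pv_equiv track=rewrite | github.com/geeknik/double-super-factorial-calculator | dsf.py | find_dsf_solution
-- ===== SOURCE A (Python) =====
-- import math
--
-- def factorial(n):
--     return math.factorial(n)
--
-- def double_super_factorial(n):
--     result = 1
--     for i in range(n, 0, -2):
--         result *= factorial(i)
--     return result
--
-- def find_dsf_solution(n):
--     nfactorial = factorial(n)
--     m = 1
--     while True:
--         dsf_m = double_super_factorial(m)
--         if dsf_m == nfactorial:
--             return n, m
--         if dsf_m > nfactorial:
--             return None
--         m += 1
-- ===== SOURCE B (Python) =====
-- import math
--
-- def find_dsf_solution(n):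
--     # Incremental: dsf(m) = m! * dsf(m-2); keep a running factorial and the
--     # last two dsf values instead of recomputing each dsf from scratch.
--     nfactorial = math.factorial(n)
--     fact = 1          # will hold m!
--     prev2 = 1         # dsf(m-2)
--     prev1 = 1         # dsf(m-1)
--     for m in range(1, nfactorial + 2):
--         fact *= m
--         dsf_m = fact * prev2
--         if dsf_m == nfactorial:
--             return n, m
--         if dsf_m > nfactorial:
--             return None
--         prev2, prev1 = prev1, dsf_m
--     return None  # unreachable: dsf(m) >= m exceeds n! within the range
-- ===== Notes on version B (the rewrite author's own statement) =====
-- stated objective: faster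
-- what changed: B replaces A's per-step recomputation of double_super_factorial(m) from scratch (a fresh product of factorials every iteration) by the recurrence dsf(m) = m! * dsf(m-2), maintaining a running factorial and the last two dsf values, so each step is one multiplication.
import Mathlib
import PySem

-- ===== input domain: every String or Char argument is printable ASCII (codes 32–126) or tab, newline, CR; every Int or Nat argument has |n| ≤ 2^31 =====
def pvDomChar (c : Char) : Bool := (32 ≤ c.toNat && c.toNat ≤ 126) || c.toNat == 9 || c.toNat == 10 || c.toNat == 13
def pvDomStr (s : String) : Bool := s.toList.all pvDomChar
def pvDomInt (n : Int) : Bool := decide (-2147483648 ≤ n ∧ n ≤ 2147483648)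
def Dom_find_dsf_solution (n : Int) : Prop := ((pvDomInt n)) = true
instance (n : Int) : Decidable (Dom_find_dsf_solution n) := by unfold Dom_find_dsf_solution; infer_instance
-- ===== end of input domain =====

-- B changes the algorithm: dsf(m)=m!*dsf(m-2) incrementally instead of recomputing each
-- double_super_factorial(m) from scratch (objective: faster).

-- ===== PORT A =====
-- math.factorial; exact on Pre_; Python raises ValueError for negative arguments.
def pyFactorial (n : Int) : Int := ((Nat.factorial n.toNat : Nat) : Int)

def double_super_factorial (n : Int) : Int :=
  (PySem.List.pyRange n 0 (-2)).foldl (fun result i => result * pyFactorial i) 1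

-- dsf(m) ≥ m: used only for termination of A's while-True loop (cited in decreasing_by).
theorem dsf_foldl_ge_one (l : List Int) (a : Int) (ha : 1 ≤ a) :
    a ≤ l.foldl (fun result i => result * pyFactorial i) a := by
  induction l generalizing a with
  | nil => simp
  | cons x xs ih =>
    have hf : 1 ≤ pyFactorial x := by
      unfold pyFactorial; exact_mod_cast Nat.one_le_iff_ne_zero.mpr (Nat.factorial_pos _).ne'
    have h1 : a ≤ a * pyFactorial x := le_mul_of_one_le_right (by omega) hf
    exact le_trans h1 (ih _ (by omega))

theorem pyRange_neg_two_cons (m : Int) (hm : 0 < m) :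
    PySem.List.pyRange m 0 (-2) = m :: PySem.List.pyRange (m - 2) 0 (-2) := by
  simp only [PySem.List.pyRange]
  norm_num
  rw [if_pos hm]
  have h2 : ((m + 2 - 1) / 2).toNat = (if 2 < m then ((m - 1) / 2).toNat else 0) + 1 := by
    split_ifs with h3 <;> omega
  rw [h2, List.range_succ_eq_map, List.map_cons, List.map_map]
  congr 1
  · push_cast; ring
  · apply List.map_congr_left; intro k _
    simp only [Function.comp]
    push_cast; ring

theorem dsf_ge_self (m : Int) : m ≤ double_super_factorial m := by
  by_cases hm : 0 < m
  · rw [double_super_factorial, pyRange_neg_two_cons m hm]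
    simp only [List.foldl_cons, one_mul]
    have hfm : m ≤ pyFactorial m := by
      unfold pyFactorial
      calc m ≤ (m.toNat : Int) := by omega
        _ ≤ _ := by exact_mod_cast Nat.self_le_factorial _
    exact le_trans hfm (dsf_foldl_ge_one _ _ (by
      have : (1 : Int) ≤ pyFactorial m := by
        unfold pyFactorial; exact_mod_cast Nat.one_le_iff_ne_zero.mpr (Nat.factorial_pos _).ne'
      omega))
  · have := dsf_foldl_ge_one (PySem.List.pyRange m 0 (-2)) 1 le_rfl
    unfold double_super_factorial; omega

-- A's while-True loop; terminates because dsf(m) ≥ m forces an exit by m = nfactorial + 1.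
def loopA (n nfactorial m : Int) : Option (List Int) :=
  let dsf_m := double_super_factorial m
  if dsf_m = nfactorial then some [n, m]
  else if dsf_m > nfactorial then none
  else loopA n nfactorial (m + 1)
termination_by (nfactorial + 1 - m).toNat
decreasing_by
  have h := dsf_ge_self m
  simp_all only [gt_iff_lt, not_lt]
  omega

def find_dsf_solution (n : Int) : Option (List Int) :=
  let nfactorial := pyFactorial n
  loopA n nfactorial 1

-- ===== PORT B =====
-- B's for-loop over range(1, nfactorial + 2); k counts the remaining iterations.
def loopB (n nfactorial m fact prev2 prev1 : Int) (k : Nat) : Option (List Int) :=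
  match k with
  | 0 => none
  | k + 1 =>
    let fact' := fact * m
    let dsf_m := fact' * prev2
    if dsf_m = nfactorial then some [n, m]
    else if dsf_m > nfactorial then none
    else loopB n nfactorial (m + 1) fact' prev1 dsf_m k

def find_dsf_solution_alt (n : Int) : Option (List Int) :=
  let nfactorial := pyFactorial n
  loopB n nfactorial 1 1 1 1 (nfactorial + 1).toNat

-- ===== PRECONDITION & SPEC =====
-- Pre_ excludes negative n, where math.factorial raises ValueError in A (and in B).
def Pre_find_dsf_solution (n : Int) : Prop := 0 ≤ n
instance (n : Int) : Decidable (Pre_find_dsf_solution n) := by unfold Pre_find_dsf_solution; infer_instance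
def pvWitness_find_dsf_solution : Int := 3

def Spec_find_dsf_solution (n : Int) (out : Option (List Int)) : Prop := out = find_dsf_solution_alt n
instance (n : Int) (out : Option (List Int)) : Decidable (Spec_find_dsf_solution n out) := by unfold Spec_find_dsf_solution; infer_instance

-- ===== CLAIM (what is proved, stated in full; the proofs are below) =====
def Claim_equal_find_dsf_solution : Prop := ∀ (n : Int), Dom_find_dsf_solution n → Pre_find_dsf_solution n → Spec_find_dsf_solution n (find_dsf_solution n)

-- ===== LEMMAS AND PROOFS =====

-- foldl over (· * pyFactorial ·) pulls a factor out of the accumulator.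
theorem dsf_foldl_mul (l : List Int) (a b : Int) :
    l.foldl (fun result i => result * pyFactorial i) (a * b)
      = a * l.foldl (fun result i => result * pyFactorial i) b := by
  induction l generalizing b with
  | nil => simp
  | cons x xs ih => simp only [List.foldl_cons, mul_assoc, ih]

-- the recurrence dsf(m) = m! * dsf(m-2) for m ≥ 1
theorem dsf_step (m : Int) (hm : 0 < m) :
    double_super_factorial m = pyFactorial m * double_super_factorial (m - 2) := by
  unfold double_super_factorial
  rw [pyRange_neg_two_cons m hm]
  simp only [List.foldl_cons, one_mul]
  conv_lhs => rw [← mul_one (pyFactorial m)]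
  rw [dsf_foldl_mul]

theorem fac_succ (m : Int) (hm : 0 < m) :
    pyFactorial (m - 1) * m = pyFactorial m := by
  unfold pyFactorial
  have h : m.toNat = (m - 1).toNat + 1 := by omega
  rw [h, Nat.factorial_succ]
  push_cast
  have : ((m - 1).toNat : Int) + 1 = m := by omega
  rw [this]; ring

theorem loop_eq (nfact : Int) (k : Nat) :
    ∀ (n m fact prev2 prev1 : Int), 1 ≤ m →
      fact = pyFactorial (m - 1) →
      prev2 = double_super_factorial (m - 2) →
      prev1 = double_super_factorial (m - 1) →
      (nfact + 2 - m).toNat = k →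
      loopA n nfact m = loopB n nfact m fact prev2 prev1 k := by
  induction k with
  | zero =>
    intro n m fact prev2 prev1 hm _ _ _ hk
    have hge : nfact + 2 ≤ m := by omega
    rw [loopA, loopB]
    have hd := dsf_ge_self m
    have h1 : ¬ (double_super_factorial m = nfact) := by omega
    have h2 : double_super_factorial m > nfact := by omega
    simp only [h1, if_false, if_pos h2]
  | succ k ih =>
    intro n m fact prev2 prev1 hm hfact hp2 hp1 hk
    rw [loopA, loopB]
    have hds : fact * m * prev2 = double_super_factorial m := by
      rw [hfact, hp2, fac_succ m (by omega), ← dsf_step m (by omega)]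
    simp only [hds]
    by_cases h1 : double_super_factorial m = nfact
    · simp [h1]
    · simp only [h1, if_false]
      by_cases h2 : double_super_factorial m > nfact
      · simp [h2]
      · simp only [h2, if_false]
        exact ih n (m + 1) (fact * m) prev1 (double_super_factorial m) (by omega)
          (by rw [hfact]; simpa using fac_succ m (by omega))
          (by rw [hp1]; ring_nf)
          (by ring_nf)
          (by have := dsf_ge_self m; omega)

-- ===== VERDICT (by name: the statement is the Claim_ definition above) =====
theorem find_dsf_solution_spec : Claim_equal_find_dsf_solution := by
  intro n _ hpre
  unfold Spec_find_dsf_solution find_dsf_solution find_dsf_solution_alt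
  have hfac1 : (1 : Int) ≤ pyFactorial n := by
    unfold pyFactorial; exact_mod_cast Nat.one_le_iff_ne_zero.mpr (Nat.factorial_pos _).ne'
  apply loop_eq (pyFactorial n) _ n 1 1 1 1 le_rfl
  · unfold pyFactorial; norm_num
  · unfold double_super_factorial
    rw [show (1 : Int) - 2 = -1 by ring]
    simp [PySem.List.pyRange]
  · unfold double_super_factorial
    norm_num
    simp [PySem.List.pyRange]
  · omega
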